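-- pv_equiv track=rewrite | github.com/ishanverma104/Ciber-cipher | engine/parsers/parse-syslog-security.py | get_compliance_violations
-- ===== SOURCE A (Python) =====
-- def get_compliance_violations(mitre_hits, compliance_mapping):
--     """Map MITRE techniques to compliance frameworks"""
--     violations = set()
--
--     for mitre_hit in mitre_hits:
--         technique_id = mitre_hit.get("technique_id", "")
--
--         # Check each compliance framework
--         for framework, techniques in compliance_mapping.items():
--             if technique_id in techniques:
--                 violations.add(framework.upper())
--
--     return sorted(list(violations))
-- ===== SOURCE B (Python) =====
-- def get_compliance_violations(mitre_hits, compliance_mapping):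
--     """Map MITRE techniques to compliance frameworks (reverse-index version)"""
--     # Build once: technique_id -> set of (upper-cased) frameworks that list it
--     index = {}
--     for framework, techniques in compliance_mapping.items():
--         fu = framework.upper()
--         for t in techniques:
--             index.setdefault(t, set()).add(fu)
--
--     violations = set()
--     for mitre_hit in mitre_hits:
--         violations |= index.get(mitre_hit.get("technique_id", ""), set())
--
--     return sorted(violations)
-- ===== Notes on version B (the rewrite author's own statement) =====
-- stated objective: faster
-- what changed: Replaces the per-hit scan over every framework's technique list by a reverse index technique_id->frameworks built once, so each hit is a single dict lookup and set union.
import Mathlib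
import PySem

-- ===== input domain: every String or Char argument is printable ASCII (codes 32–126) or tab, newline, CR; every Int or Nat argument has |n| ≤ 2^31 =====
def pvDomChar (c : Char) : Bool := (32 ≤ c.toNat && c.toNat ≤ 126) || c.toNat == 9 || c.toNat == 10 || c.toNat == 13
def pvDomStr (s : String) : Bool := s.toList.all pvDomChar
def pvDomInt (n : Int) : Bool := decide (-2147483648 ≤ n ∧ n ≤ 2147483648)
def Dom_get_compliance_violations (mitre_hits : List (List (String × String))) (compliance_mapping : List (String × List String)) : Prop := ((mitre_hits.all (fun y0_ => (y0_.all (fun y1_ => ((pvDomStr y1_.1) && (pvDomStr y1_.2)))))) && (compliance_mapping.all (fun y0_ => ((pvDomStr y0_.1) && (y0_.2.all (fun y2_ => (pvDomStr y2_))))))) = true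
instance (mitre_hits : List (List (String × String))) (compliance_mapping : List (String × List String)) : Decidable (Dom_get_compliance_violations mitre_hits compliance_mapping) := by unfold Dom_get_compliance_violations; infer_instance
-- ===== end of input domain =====

-- B replaces A's per-hit scan over every framework's technique list by a reverse index
-- technique_id -> frameworks built once (objective: faster, asymptotic O(F*T + H) vs O(H*F*T)).

-- ===== PORT A =====
def get_compliance_violations (mitre_hits : List (List (String × String))) (compliance_mapping : List (String × List String)) : List String :=
  let violations : PySem.Set String :=
    mitre_hits.foldl (fun violations mitre_hit =>
      let technique_id := PySem.Dict.getD (PySem.Dict.mk mitre_hit) "technique_id" ""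
      compliance_mapping.foldl (fun violations p =>
        if p.2.contains technique_id then PySem.Set.add violations (PySem.Str.upper p.1)
        else violations) violations)
      PySem.Set.empty
  PySem.List.sorted violations (fun x => x)

-- ===== PORT B =====
def get_compliance_violations_alt (mitre_hits : List (List (String × String))) (compliance_mapping : List (String × List String)) : List String :=
  let index : PySem.Dict String (PySem.Set String) :=
    compliance_mapping.foldl (fun d p =>
      let fu := PySem.Str.upper p.1
      p.2.foldl (fun d t => d.modify t PySem.Set.empty (fun s => PySem.Set.add s fu)) d)
      PySem.Dict.empty
  let violations : PySem.Set String :=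
    mitre_hits.foldl (fun vs mitre_hit =>
      PySem.Set.union vs (index.getD (PySem.Dict.getD (PySem.Dict.mk mitre_hit) "technique_id" "") PySem.Set.empty))
      PySem.Set.empty
  PySem.List.sorted violations (fun x => x)

-- ===== PRECONDITION & SPEC =====
def Spec_get_compliance_violations (mitre_hits : List (List (String × String))) (compliance_mapping : List (String × List String)) (out : List String) : Prop := out = get_compliance_violations_alt mitre_hits compliance_mapping
instance (mitre_hits : List (List (String × String))) (compliance_mapping : List (String × List String)) (out : List String) : Decidable (Spec_get_compliance_violations mitre_hits compliance_mapping out) := by unfold Spec_get_compliance_violations; infer_instance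

-- ===== CLAIM (what is proved, stated in full; the proofs are below) =====
def Claim_equal_get_compliance_violations : Prop := ∀ (mitre_hits : List (List (String × String))) (compliance_mapping : List (String × List String)), Dom_get_compliance_violations mitre_hits compliance_mapping → Spec_get_compliance_violations mitre_hits compliance_mapping (get_compliance_violations mitre_hits compliance_mapping)

-- ===== LEMMAS AND PROOFS =====

-- A's inner loop: membership after scanning all frameworks for one technique id
theorem memA_inner (cm : List (String × List String)) (vs : PySem.Set String) (tid x : String) :
    x ∈ cm.foldl (fun violations p =>
        if p.2.contains tid then PySem.Set.add violations (PySem.Str.upper p.1) else violations) vs ↔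
      x ∈ vs ∨ ∃ p ∈ cm, tid ∈ p.2 ∧ x = PySem.Str.upper p.1 := by
  induction cm generalizing vs with
  | nil => simp
  | cons q qs ih =>
    simp only [List.foldl_cons, ih, List.mem_cons]
    by_cases h : tid ∈ q.2
    · simp only [h, List.contains_iff_mem, if_true, PySem.Set.mem_add]
      aesop
    · simp only [List.contains_iff_mem, h, if_false]
      aesop

-- A's outer loop: membership in the final violations set
theorem memA (mh : List (List (String × String))) (cm : List (String × List String)) (vs : PySem.Set String) (x : String) :
    x ∈ mh.foldl (fun violations mitre_hit =>
        cm.foldl (fun violations p =>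
          if p.2.contains (PySem.Dict.getD (PySem.Dict.mk mitre_hit) "technique_id" "") then
            PySem.Set.add violations (PySem.Str.upper p.1) else violations) violations) vs ↔
      x ∈ vs ∨ ∃ hit ∈ mh, ∃ p ∈ cm,
        (PySem.Dict.getD (PySem.Dict.mk hit) "technique_id" "") ∈ p.2 ∧ x = PySem.Str.upper p.1 := by
  induction mh generalizing vs with
  | nil => simp
  | cons h hs ih =>
    simp only [List.foldl_cons, ih, memA_inner, List.mem_cons]
    aesop

-- A's loops preserve Nodup of the accumulator
theorem nodupA_inner (cm : List (String × List String)) (vs : PySem.Set String) (tid : String)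
    (h : vs.Nodup) :
    (cm.foldl (fun violations p =>
        if p.2.contains tid then PySem.Set.add violations (PySem.Str.upper p.1) else violations) vs).Nodup := by
  induction cm generalizing vs with
  | nil => exact h
  | cons q qs ih =>
    simp only [List.foldl_cons]
    apply ih
    split
    · exact PySem.Set.nodup_add vs _ h
    · exact h

theorem nodupA (mh : List (List (String × String))) (cm : List (String × List String)) (vs : PySem.Set String)
    (h : vs.Nodup) :
    (mh.foldl (fun violations mitre_hit =>
        cm.foldl (fun violations p =>
          if p.2.contains (PySem.Dict.getD (PySem.Dict.mk mitre_hit) "technique_id" "") then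
            PySem.Set.add violations (PySem.Str.upper p.1) else violations) violations) vs).Nodup := by
  induction mh generalizing vs with
  | nil => exact h
  | cons hd tl ih => exact ih _ (nodupA_inner _ _ _ h)

-- B's index, inner loop over one framework's techniques
theorem memB_index_inner (ts : List String) (d : PySem.Dict String (PySem.Set String)) (fu t x : String) :
    x ∈ (ts.foldl (fun d t' => d.modify t' PySem.Set.empty (fun s => PySem.Set.add s fu)) d).getD t PySem.Set.empty ↔
      x ∈ d.getD t PySem.Set.empty ∨ (t ∈ ts ∧ x = fu) := by
  induction ts generalizing d with
  | nil => simp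
  | cons u us ih =>
    simp only [List.foldl_cons, ih, List.mem_cons]
    rw [PySem.Dict.getD_modify]
    by_cases h : t = u
    · subst h; simp only [if_pos rfl]; aesop
    · simp only [if_neg h]; aesop

-- B's index, outer loop over the compliance mapping
theorem memB_index (cm : List (String × List String)) (d : PySem.Dict String (PySem.Set String)) (t x : String) :
    x ∈ (cm.foldl (fun d p =>
        p.2.foldl (fun d t' => d.modify t' PySem.Set.empty (fun s => PySem.Set.add s (PySem.Str.upper p.1))) d) d).getD t PySem.Set.empty ↔
      x ∈ d.getD t PySem.Set.empty ∨ ∃ p ∈ cm, t ∈ p.2 ∧ x = PySem.Str.upper p.1 := by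
  induction cm generalizing d with
  | nil => simp
  | cons q qs ih =>
    simp only [List.foldl_cons, ih, memB_index_inner, List.mem_cons]
    aesop

-- B's accumulation loop over the hits
theorem memB_acc (mh : List (List (String × String))) (idx : PySem.Dict String (PySem.Set String)) (vs : PySem.Set String) (x : String) :
    x ∈ mh.foldl (fun vs mitre_hit =>
        PySem.Set.union vs (idx.getD (PySem.Dict.getD (PySem.Dict.mk mitre_hit) "technique_id" "") PySem.Set.empty)) vs ↔
      x ∈ vs ∨ ∃ hit ∈ mh, x ∈ idx.getD (PySem.Dict.getD (PySem.Dict.mk hit) "technique_id" "") PySem.Set.empty := by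
  induction mh generalizing vs with
  | nil => simp
  | cons h hs ih =>
    simp only [List.foldl_cons, ih, PySem.Set.mem_union, List.mem_cons]
    aesop

theorem nodupB_acc (mh : List (List (String × String))) (idx : PySem.Dict String (PySem.Set String)) (vs : PySem.Set String)
    (h : vs.Nodup) :
    (mh.foldl (fun vs mitre_hit =>
        PySem.Set.union vs (idx.getD (PySem.Dict.getD (PySem.Dict.mk mitre_hit) "technique_id" "") PySem.Set.empty)) vs).Nodup := by
  induction mh generalizing vs with
  | nil => exact h
  | cons hd tl ih => exact ih _ (PySem.Set.nodup_union _ _ h)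

-- ===== VERDICT (by name: the statement is the Claim_ definition above) =====
theorem get_compliance_violations_spec : Claim_equal_get_compliance_violations := by
  intro mh cm _
  show get_compliance_violations mh cm = get_compliance_violations_alt mh cm
  unfold get_compliance_violations get_compliance_violations_alt
  apply PySem.List.sorted_eq_sorted_of_perm _ _ _ (fun _ _ h => h)
  refine (List.perm_ext_iff_of_nodup (nodupA mh cm PySem.Set.empty List.nodup_nil)
    (nodupB_acc mh _ PySem.Set.empty List.nodup_nil)).2 ?_
  intro x
  constructor
  · intro hx
    rcases (memA mh cm PySem.Set.empty x).1 hx with h0 | ⟨hit, hh, p, hp, hm, hxe⟩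
    · exact absurd h0 (List.not_mem_nil)
    · exact (memB_acc mh _ PySem.Set.empty x).2
        (Or.inr ⟨hit, hh, (memB_index cm PySem.Dict.empty _ x).2 (Or.inr ⟨p, hp, hm, hxe⟩)⟩)
  · intro hx
    rcases (memB_acc mh _ PySem.Set.empty x).1 hx with h0 | ⟨hit, hh, hxi⟩
    · exact absurd h0 (List.not_mem_nil)
    · rcases (memB_index cm PySem.Dict.empty _ x).1 hxi with h0 | ⟨p, hp, hm, hxe⟩
      · simp [PySem.Dict.getD_empty, PySem.Set.empty] at h0
      · exact (memA mh cm PySem.Set.empty x).2 (Or.inr ⟨hit, hh, p, hp, hm, hxe⟩)
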